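-- pv_equiv track=rewrite | github.com/trishajanath/AltX | backend/monaco_server.py | fix_unterminated_strings
-- ===== SOURCE A (Python) =====
-- def fix_unterminated_strings(text: str) -> str:
--     """Fix unterminated strings in JSON"""
--     try:
--         # Find strings that aren't properly closed
--         result = ""
--         in_string = False
--         escape_next = False
--
--         for i, char in enumerate(text):
--             if escape_next:
--                 result += char
--                 escape_next = False
--                 continue
--
--             if char == '\\' and in_string:
--                 result += char
--                 escape_next = True
--                 continue
--
--             if char == '"':
--                 if in_string:
--                     # End of string
--                     in_string = False
--                 else:
--                     # Start of string
--                     in_string = True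
--                 result += char
--             elif char == '\n' and in_string:
--                 # Unterminated string at newline - close it
--                 result += '"'
--                 in_string = False
--                 result += char
--             else:
--                 result += char
--
--         # If we end while still in a string, close it
--         if in_string:
--             result += '"'
--
--         return result
--     except Exception:
--         return text
-- ===== SOURCE B (Python) =====
-- def fix_unterminated_strings(text: str) -> str:
--     """Fix unterminated strings in JSON (line-based rewrite)."""
--     try:
--         out = []
--         in_string = False
--         escape_next = False
--         first = True
--         for line in text.split('\n'):
--             if first:
--                 first = False
--             else:
--                 # we are crossing the newline that preceded this line
--                 if escape_next:
--                     # the newline itself was the escaped character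
--                     escape_next = False
--                 elif in_string:
--                     # unterminated string at the newline - close it
--                     out.append('"')
--                     in_string = False
--                 out.append('\n')
--             for ch in line:
--                 if escape_next:
--                     escape_next = False
--                 elif ch == '\\' and in_string:
--                     escape_next = True
--                 elif ch == '"':
--                     in_string = not in_string
--                 out.append(ch)
--         if in_string:
--             out.append('"')
--         return ''.join(out)
--     except Exception:
--         return text
-- ===== Notes on version B (the rewrite author's own statement) =====
-- stated objective: alternative
-- what changed: B splits the text on '\n' and processes line by line, threading the in_string/escape state across the joins and closing an unterminated string at each line boundary, instead of A's single character-by-character scan with a newline branch.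
import Mathlib
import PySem

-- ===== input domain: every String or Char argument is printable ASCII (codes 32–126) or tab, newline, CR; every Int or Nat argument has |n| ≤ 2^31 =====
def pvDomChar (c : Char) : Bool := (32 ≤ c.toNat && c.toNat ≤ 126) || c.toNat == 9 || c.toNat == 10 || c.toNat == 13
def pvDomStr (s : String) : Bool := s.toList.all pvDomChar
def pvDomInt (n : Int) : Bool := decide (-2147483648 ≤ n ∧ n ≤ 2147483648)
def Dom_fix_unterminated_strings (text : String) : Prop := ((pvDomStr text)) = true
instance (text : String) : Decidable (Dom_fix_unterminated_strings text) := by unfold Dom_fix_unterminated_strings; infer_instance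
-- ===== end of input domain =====

-- B re-implements the scan line-by-line (split on '\n', string/escape state threaded
-- across the joins) instead of A's single character loop; objective: alternative decomposition.

-- ===== PORT A =====
-- A's loop body, branch for branch; state: (result, in_string, escape_next)
def pvStepA (st : List Char × Bool × Bool) (c : Char) : List Char × Bool × Bool :=
  let (res, ins, esc) := st
  if esc then (res ++ [c], ins, false)
  else if c = '\\' && ins then (res ++ [c], ins, true)
  else if c = '"' then (res ++ [c], !ins, esc)
  else if c = '\n' && ins then (res ++ ['"', c], false, esc)
  else (res ++ [c], ins, esc)

-- A's code after the loop: "if in_string: result += '\"'"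
def pvFinA (r : List Char × Bool × Bool) : List Char :=
  if r.2.1 then r.1 ++ ['"'] else r.1

-- A's try-body performs no raising operation, so the `except` branch is unreachable.
def fix_unterminated_strings (text : String) : String :=
  String.ofList (pvFinA (text.toList.foldl pvStepA ([], false, false)))

-- ===== PORT B =====
-- port of text.split('\n'): exact for a single-character separator; (first line, remaining lines)
def pvSplitNlAux : List Char → List Char × List (List Char)
  | [] => ([], [])
  | c :: cs =>
    let (l, ls) := pvSplitNlAux cs
    if c = '\n' then ([], l :: ls) else (c :: l, ls)

-- Source B's inner per-character loop; state: (out, in_string, escape_next)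
def pvStepBIn (st : List Char × Bool × Bool) (c : Char) : List Char × Bool × Bool :=
  let (out, ins, esc) := st
  if esc then (out ++ [c], ins, false)
  else if c = '\\' && ins then (out ++ [c], ins, true)
  else if c = '"' then (out ++ [c], !ins, esc)
  else (out ++ [c], ins, esc)

-- Source B's outer per-line loop; state: (out, first, in_string, escape_next)
def pvStepBOut (st : List Char × Bool × Bool × Bool) (line : List Char) :
    List Char × Bool × Bool × Bool :=
  let (out, first, ins, esc) := st
  let s1 : List Char × Bool × Bool :=
    if first then (out, ins, esc)
    else if esc then (out ++ ['\n'], ins, false)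
    else if ins then (out ++ ['"', '\n'], false, esc)
    else (out ++ ['\n'], ins, esc)
  let s2 := line.foldl pvStepBIn s1
  (s2.1, false, s2.2.1, s2.2.2)

-- Source B's code after the loop: "if in_string: out.append('\"')"
def pvFinB (r : List Char × Bool × Bool × Bool) : List Char :=
  if r.2.2.1 then r.1 ++ ['"'] else r.1

def fix_unterminated_strings_alt (text : String) : String :=
  let (l0, ls) := pvSplitNlAux text.toList
  String.ofList (pvFinB ((l0 :: ls).foldl pvStepBOut ([], true, false, false)))

-- ===== PRECONDITION & SPEC =====
def Spec_fix_unterminated_strings (text : String) (out : String) : Prop := out = fix_unterminated_strings_alt text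
instance (text : String) (out : String) : Decidable (Spec_fix_unterminated_strings text out) := by unfold Spec_fix_unterminated_strings; infer_instance

-- ===== CLAIM (what is proved, stated in full; the proofs are below) =====
def Claim_equal_fix_unterminated_strings : Prop := ∀ (text : String), Dom_fix_unterminated_strings text → Spec_fix_unterminated_strings text (fix_unterminated_strings text)

-- ===== LEMMAS AND PROOFS =====

-- direct-recursion form of A's scan (final close included)
def prA : Bool → Bool → List Char → List Char
  | ins, _, [] => if ins then ['"'] else []
  | ins, esc, c :: cs =>
    if esc then c :: prA ins false cs
    else if c = '\\' && ins then c :: prA ins true cs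
    else if c = '"' then c :: prA (!ins) esc cs
    else if c = '\n' && ins then '"' :: c :: prA false esc cs
    else c :: prA ins esc cs

-- (in_string, escape_next) after scanning one newline-free line
def stLine : Bool → Bool → List Char → Bool × Bool
  | ins, esc, [] => (ins, esc)
  | ins, esc, c :: cs =>
    if esc then stLine ins false cs
    else if c = '\\' && ins then stLine ins true cs
    else if c = '"' then stLine (!ins) esc cs
    else stLine ins esc cs

-- direct-recursion form of B's remaining lines (each preceded by a newline boundary)
def prRest : Bool → Bool → List (List Char) → List Char
  | ins, _, [] => if ins then ['"'] else []
  | ins, esc, l :: ls =>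
    if esc then '\n' :: (l ++ prRest (stLine ins false l).1 (stLine ins false l).2 ls)
    else if ins then '"' :: '\n' :: (l ++ prRest (stLine false esc l).1 (stLine false esc l).2 ls)
    else '\n' :: (l ++ prRest (stLine ins esc l).1 (stLine ins esc l).2 ls)

theorem foldA_eq (cs : List Char) : ∀ (res : List Char) (ins esc : Bool),
    pvFinA (List.foldl pvStepA (res, ins, esc) cs) = res ++ prA ins esc cs := by
  induction cs with
  | nil => intro res ins esc; cases ins <;> simp [pvFinA, prA]
  | cons c cs ih =>
    intro res ins esc
    simp only [List.foldl_cons, pvStepA, prA]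
    split_ifs <;> rw [ih] <;> simp

theorem foldBIn_eq (l : List Char) : ∀ (out : List Char) (ins esc : Bool),
    List.foldl pvStepBIn (out, ins, esc) l = (out ++ l, stLine ins esc l) := by
  induction l with
  | nil => intro out ins esc; simp [stLine]
  | cons c cs ih =>
    intro out ins esc
    simp only [List.foldl_cons, pvStepBIn, stLine]
    split_ifs <;> rw [ih] <;> simp

theorem foldBOut_eq (ls : List (List Char)) : ∀ (out : List Char) (ins esc : Bool),
    pvFinB (List.foldl pvStepBOut (out, false, ins, esc) ls) = out ++ prRest ins esc ls := by
  induction ls with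
  | nil => intro out ins esc; cases ins <;> simp [pvFinB, prRest]
  | cons l ls ih =>
    intro out ins esc
    simp only [List.foldl_cons, pvStepBOut, Bool.false_eq_true, if_false, prRest]
    split_ifs <;> simp only [foldBIn_eq] <;> rw [ih] <;> simp
/- main lemma: A's one-pass scan equals B's split/boundary/join decomposition -/
theorem prA_eq_split (cs : List Char) : ∀ (ins esc : Bool),
    prA ins esc cs
      = (pvSplitNlAux cs).1
          ++ prRest (stLine ins esc (pvSplitNlAux cs).1).1
                    (stLine ins esc (pvSplitNlAux cs).1).2 (pvSplitNlAux cs).2 := by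
  induction cs with
  | nil => intro ins esc; simp [pvSplitNlAux, stLine, prA, prRest]
  | cons c cs ih =>
    intro ins esc
    by_cases hc : c = '\n'
    · subst hc
      by_cases he : esc = true
      · simp [pvSplitNlAux, prA, prRest, stLine, he, ih]
      · by_cases hi : ins = true <;>
          simp [pvSplitNlAux, prA, prRest, stLine, he, hi, ih]
    · rcases hsp : pvSplitNlAux cs with ⟨l, ls⟩
      have ih' : ∀ (ins esc : Bool), prA ins esc cs
          = l ++ prRest (stLine ins esc l).1 (stLine ins esc l).2 ls := by
        intro ins esc; have h := ih ins esc; rwa [hsp] at h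
      simp only [pvSplitNlAux, hsp, if_neg hc, prA, stLine]
      split_ifs with h1 h2 h3 h4
      · simp [ih']
      · simp [ih']
      · simp [ih']
      · simp only [Bool.and_eq_true, decide_eq_true_eq] at h4; exact absurd h4.1 hc
      · simp [ih']

-- ===== VERDICT (by name: the statement is the Claim_ definition above) =====
theorem fix_unterminated_strings_spec : Claim_equal_fix_unterminated_strings := by
  intro text _
  unfold Spec_fix_unterminated_strings fix_unterminated_strings fix_unterminated_strings_alt
  rcases hsp : pvSplitNlAux text.toList with ⟨l0, ls⟩
  have hA := foldA_eq text.toList [] false false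
  have hM := prA_eq_split text.toList false false
  rw [hsp] at hM
  simp only [hA, hM, List.nil_append]
  congr 1
  simp [List.foldl_cons, pvStepBOut, foldBIn_eq]
  rcases hst : stLine false false l0 with ⟨i0, e0⟩
  simp [foldBOut_eq]
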